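-- pv_equiv track=rewrite | github.com/whyj107/Algorithm | CodeWar/20200622_Throwing_Darts.py | score_throws
-- ===== SOURCE A (Python) =====
-- def score_throws(radii):
--     answer = 0
--     cnt = 0
--     for i in radii:
--         if i < 5:
--             answer += 10
--             cnt += 1
--         elif i <= 10:
--             answer += 5
--         else:
--             answer += 0
--         if cnt == len(radii):
--             answer += 100
--     return answer
-- ===== SOURCE B (Python) =====
-- def score_throws(radii):
--     answer = sum(10 if i < 5 else 5 if i <= 10 else 0 for i in radii)
--     if radii and all(i < 5 for i in radii):
--         answer += 100
--     return answer
-- ===== Notes on version B (the rewrite author's own statement) =====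
-- stated objective: simpler
-- what changed: Replaces the loop that maintains an incremental hit counter and re-checks cnt == len(radii) after every element with a direct sum of zone scores plus a separate all()-based bonus test.
import Mathlib
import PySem

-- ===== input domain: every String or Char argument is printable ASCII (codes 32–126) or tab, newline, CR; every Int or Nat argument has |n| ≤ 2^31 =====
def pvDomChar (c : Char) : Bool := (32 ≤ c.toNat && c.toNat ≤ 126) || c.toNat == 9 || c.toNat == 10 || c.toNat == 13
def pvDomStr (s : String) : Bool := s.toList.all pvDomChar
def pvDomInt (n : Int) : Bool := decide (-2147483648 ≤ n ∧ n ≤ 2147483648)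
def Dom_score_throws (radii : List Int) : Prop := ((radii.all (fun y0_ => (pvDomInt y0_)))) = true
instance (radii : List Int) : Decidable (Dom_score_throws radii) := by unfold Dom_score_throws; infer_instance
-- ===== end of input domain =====

-- B replaces A's loop-internal hit counter and per-iteration cnt == len(radii) bonus check with a zone-score sum plus a separate all()-based bonus test (objective: simpler).


-- ===== PORT A =====
-- loop of A: answer/cnt accumulators; n = len(radii), checked each iteration
def scoreLoopA (n : Int) : List Int → Int → Int → Int
  | [], answer, _ => answer
  | i :: rest, answer, cnt =>
    let s := if i < 5 then (answer + 10, cnt + 1)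
             else if i ≤ 10 then (answer + 5, cnt)
             else (answer + 0, cnt)
    let answer' := if s.2 = n then s.1 + 100 else s.1
    scoreLoopA n rest answer' s.2

def score_throws (radii : List Int) : Int :=
  scoreLoopA (radii.length : Int) radii 0 0

-- ===== PORT B =====
def score_throws_alt (radii : List Int) : Int :=
  let answer := (radii.map (fun i => if i < 5 then (10 : Int) else if i ≤ 10 then 5 else 0)).sum
  if radii ≠ [] ∧ radii.all (fun i => decide (i < 5)) then answer + 100 else answer

-- ===== PRECONDITION & SPEC =====
def Spec_score_throws (radii : List Int) (out : Int) : Prop := out = score_throws_alt radii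
instance (radii : List Int) (out : Int) : Decidable (Spec_score_throws radii out) := by unfold Spec_score_throws; infer_instance

-- ===== CLAIM (what is proved, stated in full; the proofs are below) =====
def Claim_equal_score_throws : Prop := ∀ (radii : List Int), Dom_score_throws radii → Spec_score_throws radii (score_throws radii)

-- ===== LEMMAS AND PROOFS =====

-- ===== VERDICT (by name: the statement is the Claim_ definition above) =====
def pvBase (l : List Int) : Int :=
  (l.map (fun i => if i < 5 then (10 : Int) else if i ≤ 10 then 5 else 0)).sum

theorem scoreLoopA_lt : ∀ (l : List Int) (n answer cnt : Int),
    cnt + l.length < n → scoreLoopA n l answer cnt = answer + pvBase l := by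
  intro l
  induction l with
  | nil => intro n a c _; simp [scoreLoopA, pvBase]
  | cons i rest ih =>
    intro n a c h
    simp only [List.length_cons] at h
    push_cast at h
    have hlen : (0:Int) ≤ rest.length := by positivity
    have hne1 : ¬ (c + 1 = n) := by omega
    have hne0 : ¬ (c = n) := by omega
    simp only [scoreLoopA]
    by_cases h5 : i < 5
    · simp only [if_pos h5, hne1, if_false]
      rw [ih _ _ _ (by omega)]
      simp [pvBase, h5]; ring
    · by_cases h10 : i ≤ 10
      · simp only [if_neg h5, if_pos h10, hne0, if_false]
        rw [ih _ _ _ (by omega)]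
        simp [pvBase, h5, h10]; ring
      · simp only [if_neg h5, if_neg h10, hne0, if_false]
        rw [ih _ _ _ (by omega)]
        simp [pvBase, h5, h10]

theorem scoreLoopA_eq : ∀ (l : List Int) (n answer cnt : Int),
    cnt + l.length = n →
    scoreLoopA n l answer cnt =
      answer + pvBase l +
        (if l ≠ [] ∧ l.all (fun i => decide (i < 5)) then 100 else 0) := by
  intro l
  induction l with
  | nil => intro n a c _; simp [scoreLoopA, pvBase]
  | cons i rest ih =>
    intro n a c h
    simp only [List.length_cons] at h
    push_cast at h
    have hlen : (0:Int) ≤ rest.length := by positivity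
    have hne0 : ¬ (c = n) := by omega
    simp only [scoreLoopA]
    by_cases h5 : i < 5
    · simp only [if_pos h5]
      by_cases hr : rest = []
      · subst hr
        simp only [List.length_nil] at h
        have hn : ((a + 10, c + 1).2 = n) := by show c + 1 = n; omega
        simp only [if_pos hn]
        simp [scoreLoopA, pvBase, h5]
      · have hlenp : (0:Int) < rest.length := by
          have := List.length_pos_iff.mpr hr; exact_mod_cast this
        have hne1 : ¬ ((a + 10, c + 1).2 = n) := by show ¬ (c + 1 = n); omega
        simp only [if_neg hne1]
        rw [ih _ _ _ (by omega)]
        simp only [pvBase, List.map_cons, List.sum_cons, if_pos h5,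
          List.all_cons]
        by_cases hall : rest.all (fun i => decide (i < 5)) = true <;>
          simp [hall, h5, hr] <;> ring
    · by_cases h10 : i ≤ 10
      · simp only [if_neg h5, if_pos h10, hne0, if_false]
        rw [scoreLoopA_lt _ _ _ _ (by omega)]
        simp [pvBase, h5, h10]; ring
      · simp only [if_neg h5, if_neg h10, hne0, if_false]
        rw [scoreLoopA_lt _ _ _ _ (by omega)]
        simp [pvBase, h5, h10]

theorem score_throws_spec : Claim_equal_score_throws := by
  intro radii _
  unfold Spec_score_throws score_throws score_throws_alt
  rw [scoreLoopA_eq radii (radii.length) 0 0 (by simp)]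
  simp only [pvBase]
  split_ifs <;> ring
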